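-- pv_equiv track=rewrite | github.com/Cyrillicspb/vpn-infra | home/scripts/update-latency-catalog.py | _dedupe_suffixes
-- ===== SOURCE A (Python) =====
-- def _normalize_domain(value: str) -> str:
--     return str(value or "").strip().lower().lstrip("*.").strip(".")
--
-- def _is_domain(value: str) -> bool:
--     value = _normalize_domain(value)
--     return bool(value and "." in value and len(value) <= 253)
--
-- def _dedupe_suffixes(domains: list[str]) -> list[str]:
--     result: list[str] = []
--     for raw in domains:
--         domain = _normalize_domain(raw)
--         if not _is_domain(domain):
--             continue
--         if any(domain == parent or domain.endswith(f".{parent}") for parent in result):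
--             continue
--         result.append(domain)
--     return result
-- ===== SOURCE B (Python) =====
-- def _normalize_domain(value: str) -> str:
--     return str(value or "").strip().lower().lstrip("*.").strip(".")
--
-- def _is_domain(value: str) -> bool:
--     value = _normalize_domain(value)
--     return bool(value and "." in value and len(value) <= 253)
--
-- def _dedupe_suffixes(domains: list[str]) -> list[str]:
--     # One pass with a hash set: a candidate is covered by a kept parent iff
--     # one of its own dot-delimited suffix tails (including itself) is already accepted.
--     result: list[str] = []
--     accepted: set[str] = set()
--     for raw in domains:
--         domain = _normalize_domain(raw)
--         if not _is_domain(domain):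
--             continue
--         tails = [domain] + [domain[i + 1:] for i, ch in enumerate(domain) if ch == "."]
--         if any(t in accepted for t in tails):
--             continue
--         result.append(domain)
--         accepted.add(domain)
--     return result
-- ===== Notes on version B (the rewrite author's own statement) =====
-- stated objective: alternative
-- what changed: Replaces A's inner scan over all kept parents (string-suffix test against each) with a hash set of accepted domains probed only with the candidate's own dot-delimited suffix tails.
import Mathlib
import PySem

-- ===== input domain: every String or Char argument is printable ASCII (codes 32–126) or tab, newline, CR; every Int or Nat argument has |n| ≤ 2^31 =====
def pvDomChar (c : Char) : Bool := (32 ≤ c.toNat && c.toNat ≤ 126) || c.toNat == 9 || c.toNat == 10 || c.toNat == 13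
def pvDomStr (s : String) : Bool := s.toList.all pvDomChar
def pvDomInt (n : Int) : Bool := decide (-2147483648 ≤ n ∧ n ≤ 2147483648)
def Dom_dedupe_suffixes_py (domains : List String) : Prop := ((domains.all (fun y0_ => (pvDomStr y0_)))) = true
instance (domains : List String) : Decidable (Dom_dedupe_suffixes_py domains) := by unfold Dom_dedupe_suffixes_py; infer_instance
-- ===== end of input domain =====

-- B replaces A's inner scan over all kept parents (string-suffix test against each) by a hash set
-- of accepted domains probed with the candidate's own dot-delimited suffix tails.

-- ===== PORT A =====
-- str.lstrip("*.") ported by hand: drop leading characters that are '*' or '.' (exact).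
def pvLstripStarDot (s : List Char) : List Char := s.dropWhile (fun c => c == '*' || c == '.')

-- _normalize_domain: `str(value or "")` is the identity on str inputs ("" stays ""), then
-- .strip().lower().lstrip("*.").strip(".")
def pvNorm (s : List Char) : List Char :=
  PySem.Chars.stripChars (pvLstripStarDot (PySem.Chars.lower (PySem.Chars.strip s))) ['.']

-- _is_domain (it re-normalizes its argument, exactly as the Python does)
def pvIsDomain (value : List Char) : Bool :=
  let v := pvNorm value
  !v.isEmpty && PySem.Chars.isIn ['.'] v && decide (v.length ≤ 253)

def dedupe_suffixes_py (domains : List String) : List String :=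
  (domains.foldl
    (fun (result : List (List Char)) raw =>
      let domain := pvNorm raw.toList
      if pvIsDomain domain = false then result
      else if result.any (fun parent => domain == parent || PySem.Chars.endswith domain ('.' :: parent)) then result
      else result ++ [domain])
    []).map String.ofList

-- ===== PORT B =====
-- tails = [domain] + [domain[i+1:] for i, ch in enumerate(domain) if ch == "."]
def pvTails (d : List Char) : List (List Char) :=
  d :: (PySem.List.enumerate d 0).filterMap
        (fun p => if p.2 == '.' then some (PySem.List.slice d (some (p.1 + 1)) none) else none)

def dedupe_suffixes_py_alt (domains : List String) : List String :=
  ((domains.foldl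
    (fun (st : List (List Char) × PySem.Set (List Char)) raw =>
      let domain := pvNorm raw.toList
      if pvIsDomain domain = false then st
      else if (pvTails domain).any (fun t => PySem.Set.contains st.2 t) then st
      else (st.1 ++ [domain], PySem.Set.add st.2 domain))
    ([], PySem.Set.empty)).1).map String.ofList

-- ===== PRECONDITION & SPEC =====
def Spec_dedupe_suffixes_py (domains : List String) (out : List String) : Prop := out = dedupe_suffixes_py_alt domains
instance (domains : List String) (out : List String) : Decidable (Spec_dedupe_suffixes_py domains out) := by unfold Spec_dedupe_suffixes_py; infer_instance

-- ===== CLAIM (what is proved, stated in full; the proofs are below) =====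
def Claim_equal_dedupe_suffixes_py : Prop := ∀ (domains : List String), Dom_dedupe_suffixes_py domains → Spec_dedupe_suffixes_py domains (dedupe_suffixes_py domains)

-- ===== LEMMAS AND PROOFS =====

-- '.'-prefixed suffixes of d are exactly the drops just past a '.' of d
lemma suffix_dot_iff (d t : List Char) :
    ('.' :: t) <:+ d ↔ ∃ k, ∃ _ : k < d.length, d[k] = '.' ∧ d.drop (k + 1) = t := by
  constructor
  · rintro ⟨x, rfl⟩
    refine ⟨x.length, by simp, ?_, ?_⟩
    · simp
    · simp
  · rintro ⟨k, h, hc, hd⟩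
    refine ⟨d.take k, ?_⟩
    have := List.drop_eq_getElem_cons h
    rw [hc, hd] at this
    rw [← this, List.take_append_drop]

-- membership in B's tail list
lemma mem_pvTails (d t : List Char) : t ∈ pvTails d ↔ t = d ∨ ('.' :: t) <:+ d := by
  simp only [pvTails, List.mem_cons, List.mem_filterMap, PySem.List.mem_enumerate_iff,
    suffix_dot_iff]
  constructor
  · rintro (rfl | ⟨p, ⟨k, hk, rfl⟩, hp⟩)
    · exact Or.inl rfl
    · simp only [zero_add] at hp
      by_cases hc : d[k] = '.'
      · rw [if_pos (by simpa using hc)] at hp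
        refine Or.inr ⟨k, hk, hc, ?_⟩
        have hcast : ((k : Int) + 1) = ((k + 1 : Nat) : Int) := by push_cast; ring
        rw [hcast, PySem.List.slice_from_natCast] at hp
        simpa using hp
      · rw [if_neg (by simpa using hc)] at hp
        exact absurd hp (by simp)
  · rintro (rfl | ⟨k, hk, hc, hd⟩)
    · exact Or.inl rfl
    · refine Or.inr ⟨((k : Int), d[k]), ⟨k, hk, by simp⟩, ?_⟩
      rw [if_pos (by simpa using hc)]
      have hcast : ((k : Int) + 1) = ((k + 1 : Nat) : Int) := by push_cast; ring
      rw [hcast, PySem.List.slice_from_natCast, hd]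

-- A's per-candidate scan over kept parents equals B's set probe with the candidate's tails
lemma cond_eq (d : List Char) (res : List (List Char)) :
    res.any (fun parent => d == parent || PySem.Chars.endswith d ('.' :: parent))
      = (pvTails d).any (fun t => PySem.Set.contains res t) := by
  rw [Bool.eq_iff_iff]
  simp only [List.any_eq_true, Bool.or_eq_true, beq_iff_eq, PySem.Chars.endswith_iff,
    PySem.Set.contains_iff, mem_pvTails]
  constructor
  · rintro ⟨p, hp, h | h⟩
    · exact ⟨d, Or.inl rfl, by rwa [h]⟩
    · exact ⟨p, Or.inr h, hp⟩
  · rintro ⟨t, h | h, ht⟩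
    · exact ⟨t, ht, Or.inl h.symm⟩
    · exact ⟨t, ht, Or.inr h⟩

-- loop invariant: B's accepted set is (as a list) exactly B's result, which equals A's result
lemma loop_eq (ds : List String) (res : List (List Char)) :
    ds.foldl
      (fun (st : List (List Char) × PySem.Set (List Char)) raw =>
        let domain := pvNorm raw.toList
        if pvIsDomain domain = false then st
        else if (pvTails domain).any (fun t => PySem.Set.contains st.2 t) then st
        else (st.1 ++ [domain], PySem.Set.add st.2 domain))
      (res, res)
    = (ds.foldl
        (fun (result : List (List Char)) raw =>
          let domain := pvNorm raw.toList
          if pvIsDomain domain = false then result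
          else if result.any (fun parent => domain == parent || PySem.Chars.endswith domain ('.' :: parent)) then result
          else result ++ [domain])
        res,
       ds.foldl
        (fun (result : List (List Char)) raw =>
          let domain := pvNorm raw.toList
          if pvIsDomain domain = false then result
          else if result.any (fun parent => domain == parent || PySem.Chars.endswith domain ('.' :: parent)) then result
          else result ++ [domain])
        res) := by
  induction ds generalizing res with
  | nil => rfl
  | cons raw ds ih =>
    simp only [List.foldl_cons]
    by_cases hdom : pvIsDomain (pvNorm raw.toList) = false
    · simp only [if_pos hdom]
      exact ih res
    · simp only [if_neg hdom]
      rw [cond_eq (pvNorm raw.toList) res]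
      by_cases hc : ((pvTails (pvNorm raw.toList)).any (fun t => PySem.Set.contains res t)) = true
      · simp only [if_pos hc]
        exact ih res
      · simp only [if_neg hc]
        have hnotmem : pvNorm raw.toList ∉ res := by
          intro hmem
          apply hc
          exact List.any_eq_true.mpr ⟨pvNorm raw.toList, (mem_pvTails _ _).mpr (Or.inl rfl),
            (PySem.Set.contains_iff _ _).mpr hmem⟩
        rw [PySem.Set.add_of_not_mem hnotmem]
        exact ih (res ++ [pvNorm raw.toList])

-- ===== VERDICT (by name: the statement is the Claim_ definition above) =====
theorem dedupe_suffixes_py_spec : Claim_equal_dedupe_suffixes_py := by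
  intro domains _
  unfold Spec_dedupe_suffixes_py dedupe_suffixes_py dedupe_suffixes_py_alt
  rw [show (([], PySem.Set.empty) : List (List Char) × PySem.Set (List Char)) = (([], []) : List (List Char) × PySem.Set (List Char)) from rfl,
    loop_eq]
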